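-- pv_equiv track=rewrite | github.com/spider2048/VashishtCTF2024 | crypto/very-suspicious/distrib.py | SUS
-- ===== SOURCE A (Python) =====
-- def SUS(num1, num2):
--     bin_num1 = bin(num1)[2:]
--     bin_num2 = bin(num2)[2:]
--
--     max_len = max(len(bin_num1), len(bin_num2))
--     bin_num1 = bin_num1.zfill(max_len)
--     bin_num2 = bin_num2.zfill(max_len)
--
--     result = ''
--     for bit1, bit2 in zip(bin_num1, bin_num2):
--         result += bit1 + bit2
--
--     return int(result, 2)
-- ===== SOURCE B (Python) =====
-- def SUS(num1, num2):
--     # LSB-first arithmetic interleave: no binary strings, no zfill, no max().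
--     result = 0
--     place = 1
--     while num1 or num2:
--         num1, b1 = divmod(num1, 2)
--         num2, b2 = divmod(num2, 2)
--         result += (2 * b1 + b2) * place
--         place *= 4
--     return result
-- ===== Notes on version B (the rewrite author's own statement) =====
-- stated objective: alternative
-- what changed: B replaces A's string pipeline (bin(), zfill, MSB-to-LSB string concatenation, int(result,2)) with a purely arithmetic LSB-first while-loop that peels one bit off each number per iteration with divmod and accumulates the interleaved value with a running place value, materialising no strings at all.
-- outside the precondition, e.g. on SUS(6, -6329): A returns 20989289, B does not finish within the time limit; on SUS(1, -2): A returns 6, B does not finish within the time limit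
import Mathlib
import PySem

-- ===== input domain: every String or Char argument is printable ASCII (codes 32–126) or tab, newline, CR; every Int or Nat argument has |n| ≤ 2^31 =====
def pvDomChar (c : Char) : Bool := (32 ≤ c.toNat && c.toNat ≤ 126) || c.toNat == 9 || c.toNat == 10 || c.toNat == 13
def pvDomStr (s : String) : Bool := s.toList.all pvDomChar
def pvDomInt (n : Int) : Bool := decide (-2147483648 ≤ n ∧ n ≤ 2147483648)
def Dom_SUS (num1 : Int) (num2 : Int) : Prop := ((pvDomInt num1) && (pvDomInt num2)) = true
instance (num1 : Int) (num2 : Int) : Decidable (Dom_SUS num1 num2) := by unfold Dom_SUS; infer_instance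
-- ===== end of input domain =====

-- B replaces A's string pipeline (bin/zfill/concat/int(,2)) by an arithmetic LSB-first
-- divmod loop — a structurally different (alternative) exact re-implementation.


-- ===== PORT A =====
def SUS (num1 : Int) (num2 : Int) : Int :=
  let bin_num1 := PySem.List.slice (PySem.Int.toBinChars0b num1) (some 2) none  -- bin(num1)[2:]
  let bin_num2 := PySem.List.slice (PySem.Int.toBinChars0b num2) (some 2) none  -- bin(num2)[2:]
  let max_len : Int := max (PySem.List.len bin_num1) (PySem.List.len bin_num2)
  let p1 := PySem.Chars.zfill bin_num1 max_len
  let p2 := PySem.Chars.zfill bin_num2 max_len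
  let result := (p1.zip p2).foldl (fun r q => r ++ [q.1, q.2]) ([] : List Char)
  -- int(result, 2), ported by hand as the base-2 digit fold: exact whenever result is a
  -- nonempty string of '0'/'1' characters, which holds on every input Pre_SUS admits
  -- (num1, num2 ≥ 0); on negative inputs Python's int() raises ValueError (outside Pre_SUS).
  result.foldl (fun a c => 2 * a + (if c = '1' then 1 else 0)) 0

-- ===== PORT B =====
-- fuel: for nonnegative inputs the while-loop runs at most bit-length ≤ natAbs + 1 times;
-- on negative inputs the Python loop never terminates (outside Pre_SUS), the fuel runs out.
def pvSusLoop : Nat → Int → Int → Int → Int → Int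
  | 0, _, _, result, _ => result
  | fuel+1, n1, n2, result, place =>
    if n1 ≠ 0 ∨ n2 ≠ 0 then
      pvSusLoop fuel (PySem.Int.floordiv n1 2) (PySem.Int.floordiv n2 2)
        (result + (2 * PySem.Int.mod n1 2 + PySem.Int.mod n2 2) * place) (place * 4)
    else result

def SUS_alt (num1 : Int) (num2 : Int) : Int :=
  pvSusLoop (num1.natAbs + num2.natAbs + 1) num1 num2 0 1

-- ===== PRECONDITION & SPEC =====
-- Pre_ excludes negative inputs: there Python A raises ValueError ('b'/'-' left in the sliced
-- string) — except the accidental corner num1 ≥ 0 > num2 with bin(num2) longer, where zfill's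
-- padding makes result start with '0b', a prefix int(·, 2) accepts, so A returns a value that
-- interleaves num2's 'b' string; Python B's while-loop does not terminate on any negative input.
def Pre_SUS (num1 : Int) (num2 : Int) : Prop := 0 ≤ num1 ∧ 0 ≤ num2
instance (num1 : Int) (num2 : Int) : Decidable (Pre_SUS num1 num2) := by unfold Pre_SUS; infer_instance
def pvWitness_SUS : Int × Int := (5, 3)

def Spec_SUS (num1 : Int) (num2 : Int) (out : Int) : Prop := out = SUS_alt num1 num2
instance (num1 : Int) (num2 : Int) (out : Int) : Decidable (Spec_SUS num1 num2 out) := by unfold Spec_SUS; infer_instance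

-- ===== CLAIM (what is proved, stated in full; the proofs are below) =====
def Claim_equal_SUS : Prop := ∀ (num1 : Int) (num2 : Int), Dom_SUS num1 num2 → Pre_SUS num1 num2 → Spec_SUS num1 num2 (SUS num1 num2)

-- ===== LEMMAS AND PROOFS =====

-- the interleaved value both programs compute, as a recursion on the bit pairs (LSB first)
def pvV : Nat → Nat → Nat
  | n1, n2 =>
    if n1 = 0 ∧ n2 = 0 then 0
    else 4 * pvV (n1 / 2) (n2 / 2) + 2 * (n1 % 2) + n2 % 2
  termination_by n1 n2 => n1 + n2
  decreasing_by omega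

lemma pvV_rec (n1 n2 : Nat) :
    pvV n1 n2 = 4 * pvV (n1 / 2) (n2 / 2) + 2 * (n1 % 2) + n2 % 2 := by
  by_cases h : n1 = 0 ∧ n2 = 0
  · obtain ⟨h1, h2⟩ := h; subst h1; subst h2; rw [pvV]; simp
  · rw [pvV]; simp [h]

-- B's loop computes pvV
lemma pvSusLoop_eq : ∀ (f : Nat) (m1 m2 : Nat) (res place : Int),
    m1 < 2 ^ f → m2 < 2 ^ f →
    pvSusLoop f (m1 : Int) (m2 : Int) res place = res + place * (pvV m1 m2 : Int) := by
  intro f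
  induction f with
  | zero =>
    intro m1 m2 res place h1 h2
    interval_cases m1
    interval_cases m2
    rw [pvV]; simp [pvSusLoop]
  | succ f ih =>
    intro m1 m2 res place h1 h2
    rw [pvSusLoop]
    by_cases h : (m1 : Int) ≠ 0 ∨ (m2 : Int) ≠ 0
    · simp only [h, if_true]
      have e1 : PySem.Int.floordiv (m1 : Int) 2 = ((m1 / 2 : Nat) : Int) := by
        exact_mod_cast PySem.Int.floordiv_natCast m1 2
      have e2 : PySem.Int.floordiv (m2 : Int) 2 = ((m2 / 2 : Nat) : Int) := by
        exact_mod_cast PySem.Int.floordiv_natCast m2 2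
      have e3 : PySem.Int.mod (m1 : Int) 2 = ((m1 % 2 : Nat) : Int) := by
        exact_mod_cast PySem.Int.mod_natCast m1 2
      have e4 : PySem.Int.mod (m2 : Int) 2 = ((m2 % 2 : Nat) : Int) := by
        exact_mod_cast PySem.Int.mod_natCast m2 2
      rw [e1, e2, e3, e4, ih (m1 / 2) (m2 / 2) _ _ (by omega) (by omega)]
      rw [pvV_rec m1 m2]
      push_cast
      ring
    · simp only [h, if_false]
      have h1' : m1 = 0 := by omega
      have h2' : m2 = 0 := by omega
      subst h1'; subst h2'
      rw [pvV]; simp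

lemma pvPow_aux (m1 m2 : Nat) : m1 < 2 ^ (m1 + m2 + 1) :=
  lt_of_lt_of_le (Nat.lt_two_pow_self) (Nat.pow_le_pow_right (by omega) (by omega))

-- A's padded binary string, MSB first, as a recursion on the width
def pvDb : Nat → Nat → List Char
  | _, 0 => []
  | m, n+1 => pvDb (m / 2) n ++ [Nat.digitChar (m % 2)]

lemma pvDb_length : ∀ (n m : Nat), (pvDb m n).length = n := by
  intro n
  induction n with
  | zero => intro m; rfl
  | succ n ih => intro m; simp [pvDb, ih]

lemma pvDb_mem : ∀ (n m : Nat) (c : Char), c ∈ pvDb m n → c = '0' ∨ c = '1' := by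
  intro n
  induction n with
  | zero => intro m c h; simp [pvDb] at h
  | succ n ih =>
    intro m c h
    simp only [pvDb, List.mem_append, List.mem_singleton] at h
    rcases h with h | h
    · exact ih _ _ h
    · rcases Nat.mod_two_eq_zero_or_one m with e | e <;> rw [e] at h <;> simp [Nat.digitChar] at h <;> simp [h]

lemma pvDb_cons_zero : ∀ (n m : Nat), m < 2 ^ n → pvDb m (n + 1) = '0' :: pvDb m n := by
  intro n
  induction n with
  | zero => intro m h; interval_cases m; decide
  | succ n ih =>
    intro m h
    have h2 : pvDb (m / 2) (n + 1) = '0' :: pvDb (m / 2) n := by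
      apply ih
      have := Nat.pow_pos (n := n) (a := 2) (by omega)
      omega
    show pvDb (m / 2) (n + 1) ++ [Nat.digitChar (m % 2)] = '0' :: (pvDb (m / 2) n ++ [Nat.digitChar (m % 2)])
    rw [h2]; simp

lemma pvDb_pad : ∀ (j n m : Nat), m < 2 ^ n → pvDb m (n + j) = List.replicate j '0' ++ pvDb m n := by
  intro j
  induction j with
  | zero => intro n m h; simp
  | succ j ih =>
    intro n m h
    have h2 : m < 2 ^ (n + j) := lt_of_lt_of_le h (Nat.pow_le_pow_right (by omega) (by omega))
    rw [show n + (j + 1) = (n + j) + 1 by omega, pvDb_cons_zero _ _ h2, ih _ _ h]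
    simp [List.replicate_succ]

-- zfill pads A's binary string out to the shared width
lemma pvZfill_pvDb (m L N : Nat) (hL : 1 ≤ L) (hLN : L ≤ N) (hm : m < 2 ^ L) :
    PySem.Chars.zfill (pvDb m L) (N : Int) = pvDb m N := by
  have hlen : (pvDb m L).length = L := pvDb_length L m
  rcases Nat.lt_or_ge L N with hlt | hge
  · rw [PySem.Chars.zfill.eq_def, if_neg (by rw [hlen]; exact_mod_cast Nat.not_le.mpr hlt)]
    cases hDb : pvDb m L with
    | nil => rw [hDb] at hlen; simp at hlen; omega
    | cons c rest =>
      have hc := pvDb_mem L m c (by rw [hDb]; simp)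
      have hcs : ¬ (c = '+' ∨ c = '-') := by rcases hc with h | h <;> subst h <;> decide
      simp only [if_neg hcs]
      rw [← hDb, hlen, Int.toNat_natCast]
      rw [show N = L + (N - L) by omega, pvDb_pad _ _ _ hm]
      congr 2
      omega
  · have hNL : N = L := by omega
    subst hNL
    rw [PySem.Chars.zfill.eq_def, if_pos (by rw [hlen])]

-- the base-2 parse of the interleaved string is pvV
lemma pvMain : ∀ (n m1 m2 : Nat) (acc : Int), m1 < 2 ^ n → m2 < 2 ^ n →
    (((pvDb m1 n).zip (pvDb m2 n)).foldl (fun r q => r ++ [q.1, q.2]) ([] : List Char)).foldl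
      (fun a c => 2 * a + (if c = '1' then 1 else 0)) acc
    = acc * 4 ^ n + (pvV m1 m2 : Int) := by
  intro n
  induction n with
  | zero =>
    intro m1 m2 acc h1 h2
    interval_cases m1
    interval_cases m2
    rw [pvV]
    simp [pvDb]
  | succ n ih =>
    intro m1 m2 acc h1 h2
    have hz : (pvDb m1 (n+1)).zip (pvDb m2 (n+1)) =
        (pvDb (m1/2) n).zip (pvDb (m2/2) n) ++ [(Nat.digitChar (m1 % 2), Nat.digitChar (m2 % 2))] := by
      show (pvDb (m1/2) n ++ [Nat.digitChar (m1 % 2)]).zip (pvDb (m2/2) n ++ [Nat.digitChar (m2 % 2)]) = _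
      rw [List.zip_append (by rw [pvDb_length, pvDb_length])]
      rfl
    rw [hz, List.foldl_append]
    simp only [List.foldl_cons, List.foldl_nil]
    rw [List.foldl_append]
    simp only [List.foldl_cons, List.foldl_nil]
    have hb1 : m1 / 2 < 2 ^ n := by have := Nat.pow_pos (n := n) (a := 2) (by omega); omega
    have hb2 : m2 / 2 < 2 ^ n := by have := Nat.pow_pos (n := n) (a := 2) (by omega); omega
    rw [ih _ _ acc hb1 hb2]
    have hv1 : (if Nat.digitChar (m1 % 2) = '1' then (1:Int) else 0) = ((m1 % 2 : Nat) : Int) := by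
      rcases Nat.mod_two_eq_zero_or_one m1 with e | e <;> rw [e] <;> decide
    have hv2 : (if Nat.digitChar (m2 % 2) = '1' then (1:Int) else 0) = ((m2 % 2 : Nat) : Int) := by
      rcases Nat.mod_two_eq_zero_or_one m2 with e | e <;> rw [e] <;> decide
    rw [hv1, hv2, pvV_rec m1 m2]
    push_cast
    ring

-- bin(m)[2:] is the canonical digit string, and it is pvDb at its own length
lemma pvToDigits_eq_pvDb : ∀ m : Nat, Nat.toDigits 2 m = pvDb m (Nat.toDigits 2 m).length := by
  intro m
  induction m using Nat.strong_induction_on with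
  | _ m ih =>
    rcases Nat.lt_or_ge m 2 with h | h
    · interval_cases m <;> decide
    · rw [Nat.toDigits_of_base_le (by omega) h]
      have ihm := ih (m / 2) (by omega)
      simp only [List.length_append, List.length_singleton]
      rw [pvDb, ← ihm]

lemma pvLt_two_pow_len (m : Nat) : m < 2 ^ (Nat.toDigits 2 m).length :=
  (Nat.length_toDigits_le_iff (by omega) (Nat.length_toDigits_pos (b := 2) (n := m))).mp le_rfl

-- A computes pvV on nonnegative inputs
lemma pvSUS_eq_pvV (m1 m2 : Nat) : SUS (m1 : Int) (m2 : Int) = (pvV m1 m2 : Int) := by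
  have hbin : ∀ m : Nat, PySem.List.slice (PySem.Int.toBinChars0b (m : Int)) (some 2) none
      = Nat.toDigits 2 m := by
    intro m
    rw [PySem.Int.toBinChars0b, if_neg (by omega)]
    rw [PySem.List.slice_some_none]
    simp [PySem.List.clampIdx]
  set L1 := (Nat.toDigits 2 m1).length with hL1
  set L2 := (Nat.toDigits 2 m2).length with hL2
  have hp1 : 0 < L1 := Nat.length_toDigits_pos
  have hp2 : 0 < L2 := Nat.length_toDigits_pos
  have hm1 : m1 < 2 ^ L1 := pvLt_two_pow_len m1
  have hm2 : m2 < 2 ^ L2 := pvLt_two_pow_len m2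
  simp only [SUS, hbin, PySem.List.len_eq]
  rw [pvToDigits_eq_pvDb m1, pvToDigits_eq_pvDb m2, ← hL1, ← hL2, pvDb_length, pvDb_length]
  have hmax : max (L1 : Int) (L2 : Int) = ((max L1 L2 : Nat) : Int) := by
    exact_mod_cast (Nat.cast_max ..).symm
  rw [hmax]
  rw [pvZfill_pvDb m1 L1 (max L1 L2) hp1 (Nat.le_max_left _ _) hm1]
  rw [pvZfill_pvDb m2 L2 (max L1 L2) hp2 (Nat.le_max_right _ _) hm2]
  rw [pvMain (max L1 L2) m1 m2 0
      (lt_of_lt_of_le hm1 (Nat.pow_le_pow_right (by omega) (Nat.le_max_left _ _)))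
      (lt_of_lt_of_le hm2 (Nat.pow_le_pow_right (by omega) (Nat.le_max_right _ _)))]
  ring

-- B computes pvV on nonnegative inputs
lemma pvSUS_alt_eq_pvV (m1 m2 : Nat) : SUS_alt (m1 : Int) (m2 : Int) = (pvV m1 m2 : Int) := by
  rw [SUS_alt]
  simp only [Int.natAbs_natCast]
  rw [pvSusLoop_eq (m1 + m2 + 1) m1 m2 0 1 (pvPow_aux m1 m2)
      (by rw [show m1 + m2 = m2 + m1 by omega]; exact pvPow_aux m2 m1)]
  ring

-- ===== VERDICT (by name: the statement is the Claim_ definition above) =====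
theorem SUS_spec : Claim_equal_SUS := by
  intro num1 num2 _ hpre
  obtain ⟨h1, h2⟩ := hpre
  obtain ⟨m1, rfl⟩ := Int.eq_ofNat_of_zero_le h1
  obtain ⟨m2, rfl⟩ := Int.eq_ofNat_of_zero_le h2
  show SUS _ _ = SUS_alt _ _
  rw [pvSUS_eq_pvV, pvSUS_alt_eq_pvV]
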